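-- pv_equiv track=rewrite | github.com/Ahsaan-566/Scripts | csv2.py | clean_csv
-- ===== SOURCE A (Python) =====
-- def clean_csv(word):
--     """
--     _______________
--     helper function
--     _______________
--     returns a string with newlines removed,
--     quotation marks preserved and padding
--     added to a row of csv file.
--     """
--     import re
--     quote = False
--     new_word = []
--     index = word.find("\n")
--     word = word[:index]
--
--     for i in word:
--         if i == '"':
--             if not quote:
--                 quote = True
--             else:
--                 quote = False
--         elif i == ',' and not quote:
--             new_word.append('##############')
--         else:
--             new_word.append(i)
--     return ''.join(new_word)
-- ===== SOURCE B (Python) =====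
-- def clean_csv(word):
--     """Truncate at the first newline (dropping the last char when none exists,
--     as A does), then split on double quotes: even segments are outside quotes
--     and get their commas padded, odd segments are inside quotes and kept."""
--     word = word[:word.find("\n")]
--     segs = word.split('"')
--     return ''.join(
--         seg.replace(',', '##############') if i % 2 == 0 else seg
--         for i, seg in enumerate(segs)
--     )
-- ===== Notes on version B (the rewrite author's own statement) =====
-- stated objective: simpler
-- what changed: Replaced the character-by-character quote-flag state machine with split-on-quote: even split segments (outside quotes) get commas replaced, odd segments are kept, then all are joined.
import Mathlib
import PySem

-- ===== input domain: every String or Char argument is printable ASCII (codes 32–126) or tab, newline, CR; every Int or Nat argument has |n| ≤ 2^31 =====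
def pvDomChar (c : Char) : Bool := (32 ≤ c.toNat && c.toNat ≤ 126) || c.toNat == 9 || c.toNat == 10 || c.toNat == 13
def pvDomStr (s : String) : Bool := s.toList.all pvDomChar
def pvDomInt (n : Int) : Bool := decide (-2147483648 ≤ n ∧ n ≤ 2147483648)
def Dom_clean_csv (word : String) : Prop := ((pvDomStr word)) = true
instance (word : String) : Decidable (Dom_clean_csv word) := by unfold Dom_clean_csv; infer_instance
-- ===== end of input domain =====

-- B is a simpler split-on-quote decomposition of A's quote-flag state machine; same return value.

-- ===== PORT A =====
-- A: truncate at the first newline (word[:find] — slice with find's -1 when absent),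
-- then a char loop with a quote flag: '"' toggles the flag and is dropped,
-- ',' outside quotes appends the padding string, anything else is appended; ''.join at the end.
-- pvStepA is the loop body of A's for-loop, state = (quote, new_word).
def pvStepA (st : Bool × List (List Char)) (i : Char) : Bool × List (List Char) :=
  if i == '"' then
    (if !st.1 then (true, st.2) else (false, st.2))
  else if i == ',' && !st.1 then
    (st.1, st.2 ++ ["##############".toList])
  else
    (st.1, st.2 ++ [[i]])

def clean_csv (word : String) : String :=
  let index : Int := PySem.Str.find word "\n"
  let w : String := PySem.Str.slice word none (some index)
  let r : Bool × List (List Char) := w.toList.foldl pvStepA (false, [])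
  String.ofList (PySem.Chars.join [] r.2)

-- ===== PORT B =====
-- B: same truncation, then split on '"'; even-indexed segments (outside quotes)
-- get commas replaced by the padding, odd-indexed segments are kept; join all.
def clean_csv_alt (word : String) : String :=
  let index : Int := PySem.Str.find word "\n"
  let w : String := PySem.Str.slice word none (some index)
  let segs : List (List Char) := PySem.Chars.splitOn w.toList ['"']
  String.ofList (PySem.Chars.join []
    ((PySem.List.enumerate segs).map
      (fun p => if PySem.Int.mod p.1 2 == 0
                then PySem.Chars.replace p.2 [','] "##############".toList
                else p.2)))

-- ===== PRECONDITION & SPEC =====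
def Spec_clean_csv (word : String) (out : String) : Prop := out = clean_csv_alt word
instance (word : String) (out : String) : Decidable (Spec_clean_csv word out) := by unfold Spec_clean_csv; infer_instance

-- ===== CLAIM (what is proved, stated in full; the proofs are below) =====
def Claim_equal_clean_csv : Prop := ∀ (word : String), Dom_clean_csv word → Spec_clean_csv word (clean_csv word)

-- ===== LEMMAS AND PROOFS =====

/-- The padding string as chars. -/
def pvHashes : List Char := "##############".toList

/-- `s.replace(',', padding)` as a structural recursion. -/
def pvRepl : List Char → List Char
  | [] => []
  | c :: r => if c = ',' then pvHashes ++ pvRepl r else c :: pvRepl r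

/-- `split('"')` as a structural recursion. -/
def pvSpl : List Char → List (List Char)
  | [] => [[]]
  | c :: r =>
    if c = '"' then [] :: pvSpl r
    else match pvSpl r with
      | [] => [[c]]
      | s :: ss => (c :: s) :: ss

/-- Output of A's state machine from quote state `q`. -/
def pvOut (q : Bool) : List Char → List Char
  | [] => []
  | c :: r =>
    if c = '"' then pvOut (!q) r
    else if c = ',' && !q then pvHashes ++ pvOut q r
    else c :: pvOut q r

/-- B's alternating treatment of the segments; `even` = current segment is outside quotes. -/
def pvProc (even : Bool) : List (List Char) → List Char
  | [] => []
  | s :: ss => (if even then pvRepl s else s) ++ pvProc (!even) ss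

theorem pvSpl_ne_nil (l : List Char) : pvSpl l ≠ [] := by
  cases l with
  | nil => simp [pvSpl]
  | cons c r =>
    simp only [pvSpl]
    split
    · simp
    · cases h : pvSpl r <;> simp

theorem pv_joinNil (ps : List (List Char)) : PySem.Chars.join [] ps = ps.flatten := by
  induction ps with
  | nil => rfl
  | cons p ps ih =>
    simp only [PySem.Chars.join, List.intercalate] at *
    cases ps <;> simp_all

/-- A's foldl, flattened: it produces `acc.flatten ++ pvOut q l`. -/
theorem pv_fold_eq (l : List Char) : ∀ (q : Bool) (acc : List (List Char)),
    ((l.foldl pvStepA (q, acc)).2).flatten = acc.flatten ++ pvOut q l := by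
  induction l with
  | nil => intro q acc; simp [pvOut]
  | cons c r ih =>
    intro q acc
    simp only [List.foldl_cons]
    by_cases hq : c = '"'
    · subst hq
      have hs : pvStepA (q, acc) '"' = (!q, acc) := by cases q <;> simp [pvStepA]
      rw [hs, ih]
      simp [pvOut]
    · by_cases hc : c = ',' ∧ q = false
      · obtain ⟨hc1, hc2⟩ := hc; subst hc1; subst hc2
        have hs : pvStepA (false, acc) ',' = (false, acc ++ ["##############".toList]) := by
          simp [pvStepA]
        rw [hs, ih]
        simp [pvOut, pvHashes]
      · have hcond : (c == ',' && !q) = false := by cases q <;> simp_all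
        have hs : pvStepA (q, acc) c = (q, acc ++ [[c]]) := by
          simp [pvStepA, hq, hcond]
        rw [hs, ih]
        simp only [pvOut, if_neg hq]
        rw [if_neg (by simp [hcond] at *; tauto)]
        simp

/-- The state machine equals the alternating segment processing. -/
theorem pv_out_eq_proc (l : List Char) : ∀ q : Bool, pvOut q l = pvProc (!q) (pvSpl l) := by
  induction l with
  | nil => intro q; cases q <;> simp [pvOut, pvSpl, pvProc, pvRepl]
  | cons c r ih =>
    intro q
    by_cases hq : c = '"'
    · subst hq
      simp only [pvOut, pvSpl]
      rw [ih (!q)]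
      cases q <;> simp [pvProc, pvRepl]
    · have hs := pvSpl_ne_nil r
      obtain ⟨s, ss, hss⟩ : ∃ s ss, pvSpl r = s :: ss := by
        cases h : pvSpl r with
        | nil => exact absurd h hs
        | cons a b => exact ⟨a, b, rfl⟩
      simp only [pvOut, pvSpl, if_neg hq, hss]
      by_cases hc : c = ','
      · subst hc
        cases q <;> simp_all [pvProc, pvRepl]
      · have : (c == ',' && !q) = false := by simp [hc]
        cases q <;> simp_all [pvProc, pvRepl]

/-- `PySem.Chars.replace.go` with the single-char pattern `','` is `pvRepl`. -/
theorem pv_replace_go (fuel : Nat) : ∀ (l acc : List Char), l.length ≤ fuel →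
    PySem.Chars.replace.go [','] pvHashes fuel l acc = acc.reverse ++ pvRepl l := by
  induction fuel with
  | zero =>
    intro l acc h
    have : l = [] := by cases l <;> simp_all
    subst this
    simp [PySem.Chars.replace.go, pvRepl]
  | succ n ih =>
    intro l acc h
    cases l with
    | nil => simp [PySem.Chars.replace.go, pvRepl]
    | cons c t =>
      simp only [PySem.Chars.replace.go]
      simp only [List.length_cons] at h
      by_cases hc : c = ','
      · subst hc
        rw [if_pos (by simp [List.isPrefixOf])]
        rw [ih _ _ (by simp; omega)]
        simp [pvRepl]
      · rw [if_neg (by simp [List.isPrefixOf]; exact fun h => hc h.symm)]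
        rw [ih _ _ (by omega)]
        simp [pvRepl, hc]

theorem pv_replace_eq (l : List Char) :
    PySem.Chars.replace l [','] pvHashes = pvRepl l := by
  simp only [PySem.Chars.replace, List.isEmpty_cons]
  have := pv_replace_go l.length l [] (le_refl _)
  simpa using this

/-- `PySem.Chars.splitOn.go` with the single-quote separator is `pvSpl`. -/
theorem pv_splitOn_go (fuel : Nat) : ∀ (l cur : List Char) (acc : List (List Char)),
    l.length ≤ fuel →
    PySem.Chars.splitOn.go ['"'] fuel l cur acc =
      acc.reverse ++ (match pvSpl l with
        | [] => []
        | s :: ss => (cur.reverse ++ s) :: ss) := by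
  induction fuel with
  | zero =>
    intro l cur acc h
    have : l = [] := by cases l <;> simp_all
    subst this
    simp [PySem.Chars.splitOn.go, pvSpl]
  | succ n ih =>
    intro l cur acc h
    cases l with
    | nil => simp [PySem.Chars.splitOn.go, pvSpl]
    | cons c t =>
      simp only [PySem.Chars.splitOn.go]
      simp only [List.length_cons] at h
      have hs := pvSpl_ne_nil t
      obtain ⟨s, ss, hss⟩ : ∃ s ss, pvSpl t = s :: ss := by
        cases hx : pvSpl t with
        | nil => exact absurd hx hs
        | cons a b => exact ⟨a, b, rfl⟩
      by_cases hc : c = '"'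
      · subst hc
        rw [if_pos (by simp [List.isPrefixOf])]
        rw [ih _ _ _ (by simp; omega)]
        simp [pvSpl, hss]
      · rw [if_neg (by simp [List.isPrefixOf]; exact fun h => hc h.symm)]
        rw [ih _ _ _ (by omega)]
        simp [pvSpl, hss, hc]

theorem pv_splitOn_eq (l : List Char) : PySem.Chars.splitOn l ['"'] = pvSpl l := by
  simp only [PySem.Chars.splitOn]
  rw [pv_splitOn_go (l.length + 1) l [] [] (by omega)]
  have hs := pvSpl_ne_nil l
  obtain ⟨s, ss, hss⟩ : ∃ s ss, pvSpl l = s :: ss := by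
    cases hx : pvSpl l with
    | nil => exact absurd hx hs
    | cons a b => exact ⟨a, b, rfl⟩
  simp [hss]

/-- B's enumerate-and-map, flattened, equals the alternating segment processing. -/
theorem pv_enum_eq_proc (segs : List (List Char)) : ∀ (n : Nat),
    ((PySem.List.enumerate segs (n : Int)).map
      (fun p => if PySem.Int.mod p.1 2 == 0
                then PySem.Chars.replace p.2 [','] "##############".toList
                else p.2)).flatten = pvProc (n % 2 == 0) segs := by
  induction segs with
  | nil => intro n; simp [PySem.List.enumerate, pvProc]
  | cons s ss ih =>
    intro n
    rw [PySem.List.enumerate_cons, List.map_cons, List.flatten_cons]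
    rw [show ((n : Int) + 1) = ((n + 1 : Nat) : Int) by push_cast; ring]
    rw [ih (n + 1)]
    have h2 : ((n + 1) % 2 == 0) = !(n % 2 == 0) := by
      rcases Nat.mod_two_eq_zero_or_one n with h | h <;> simp [Nat.add_mod, h]
    rw [h2]
    simp only [pvProc]
    congr 1
    have hmod : PySem.Int.mod (n : Int) 2 = ((n % 2 : Nat) : Int) := by
      exact_mod_cast PySem.Int.mod_natCast n 2
    rw [hmod]
    by_cases hp : n % 2 = 0
    · rw [show "##############".toList = pvHashes from rfl, pv_replace_eq]
      simp [hp]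
    · have hb1 : ((((n % 2 : Nat) : Int)) == 0) = false := by
        simpa using (by exact_mod_cast hp : ((n % 2 : Nat) : Int) ≠ 0)
      have hb2 : (((n % 2 : Nat)) == 0) = false := by simpa using hp
      simp only [hb1, hb2, Bool.false_eq_true, if_false]

-- ===== VERDICT (by name: the statement is the Claim_ definition above) =====
theorem pv_main (cs : List Char) :
    PySem.Chars.join [] (cs.foldl pvStepA (false, ([] : List (List Char)))).2 =
    PySem.Chars.join []
      ((PySem.List.enumerate (PySem.Chars.splitOn cs ['"'])).map
        (fun p => if PySem.Int.mod p.1 2 == 0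
                  then PySem.Chars.replace p.2 [','] "##############".toList
                  else p.2)) := by
  rw [pv_joinNil, pv_joinNil, pv_splitOn_eq, pv_fold_eq cs false []]
  have h0 := pv_enum_eq_proc (pvSpl cs) 0
  simp only [Nat.cast_zero, Nat.zero_mod, beq_self_eq_true] at h0
  rw [h0]
  simpa using pv_out_eq_proc cs false

theorem clean_csv_spec : Claim_equal_clean_csv := by
  intro word _
  unfold Spec_clean_csv clean_csv clean_csv_alt
  exact congrArg String.ofList (pv_main _)
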